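-- pv_equiv track=rewrite | github.com/MrJonasdeHoog/Tripeptide-generator | TripeptideGenerator.py | generate_tripeptides_with_formulas
-- ===== SOURCE A (Python) =====
-- def generate_tripeptides_with_formulas(amino_acids):
--     tripeptides_with_formulas = []
--     abbreviations = list(amino_acids.keys())
--
--     for first in abbreviations:
--         for second in abbreviations:
--             for third in abbreviations:
--                 # Ensure the generated sequence follows the specified rules
--                 if first != second and second != third and third != first:
--                     tripeptide_name = f"{first}-{second}-{third}"
--                     tripeptide_formula = f"{amino_acids[first]}-{amino_acids[second]}-{amino_acids[third]}"
--                     tripeptides_with_formulas.append((tripeptide_name, tripeptide_formula))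
--
--     return tripeptides_with_formulas
-- ===== SOURCE B (Python) =====
-- def generate_tripeptides_with_formulas(amino_acids):
--     # Selection from a shrinking pool instead of three full scans with a pairwise
--     # guard: selections(pool) pairs each entry with the pool minus that entry, so
--     # each position is drawn from a shrinking pool and values travel with their
--     # keys (no inequality guard, no dict lookups).
--     def selections(pool):
--         return [(pool[i], pool[:i] + pool[i + 1:]) for i in range(len(pool))]
--
--     items = tuple(amino_acids.items())
--     return [(f"{pk}-{qk}-{rk}", f"{pv}-{qv}-{rv}")
--             for (pk, pv), rest1 in selections(items)
--             for (qk, qv), rest2 in selections(rest1)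
--             for rk, rv in rest2]
-- ===== Notes on version B (the rewrite author's own statement) =====
-- stated objective: alternative
-- what changed: Replaces the three nested scans over the full key list with their pairwise-inequality guard and per-hit dict lookups by selection from a shrinking pool: a selections helper pairs each (key, value) item with the pool minus that item, the second position is drawn from that rest pool and the third from the rest of the rest, so no guard and no dict lookups are needed.
import Mathlib
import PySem

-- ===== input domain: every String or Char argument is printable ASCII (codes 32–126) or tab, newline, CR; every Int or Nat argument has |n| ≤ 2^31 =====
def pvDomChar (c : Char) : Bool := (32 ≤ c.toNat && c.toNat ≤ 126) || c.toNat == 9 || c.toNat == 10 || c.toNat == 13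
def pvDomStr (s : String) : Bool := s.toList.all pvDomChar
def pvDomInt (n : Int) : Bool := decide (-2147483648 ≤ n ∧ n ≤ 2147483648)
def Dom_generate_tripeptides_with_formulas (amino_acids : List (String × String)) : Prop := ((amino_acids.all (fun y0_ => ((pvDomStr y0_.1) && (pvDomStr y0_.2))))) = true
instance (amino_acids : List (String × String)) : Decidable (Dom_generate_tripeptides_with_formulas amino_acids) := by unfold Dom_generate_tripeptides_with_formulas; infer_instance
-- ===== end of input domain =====

-- B replaces A's three nested scans over the full key list (with a pairwise-
-- inequality guard and three dict lookups per hit) by selection from a shrinking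
-- pool of (key, value) items: a selections helper pairs each entry with
-- the pool minus that entry, so no guard and no lookups are needed (objective:
-- alternative algorithm of the same output-bound cost).

-- ===== PORT A =====
-- f-strings "a-b-c" are ported as PySem.Str.join "-" [a, b, c] (exact: "-".join);
-- the dict lookup amino_acids[first] is ported as getD with a default the code
-- never reaches (first is always a key of the dict).
def generate_tripeptides_with_formulas (amino_acids : List (String × String)) : List (String × String) :=
  let d : PySem.Dict String String := PySem.Dict.mk amino_acids
  let abbreviations : List String := d.keys
  abbreviations.foldl (fun acc first =>
    abbreviations.foldl (fun acc second =>
      abbreviations.foldl (fun acc third =>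
        if first ≠ second ∧ second ≠ third ∧ third ≠ first then
          acc ++ [(PySem.Str.join "-" [first, second, third],
                   PySem.Str.join "-" [d.getD first "", d.getD second "", d.getD third ""])]
        else acc) acc) acc) []

-- ===== PORT B =====
-- selections(pool) pairs each entry of the pool with the pool minus that entry:
-- [(pool[i], pool[:i] + pool[i+1:]) for i in range(len(pool))], transliterated
-- with PySem.List.pyRange / pyGetD (index always in range) / slice.
def pvSelections (pool : List (String × String)) :
    List ((String × String) × List (String × String)) :=
  (PySem.List.pyRange 0 (pool.length : Int) 1).map (fun i =>
    (PySem.List.pyGetD pool i ("", ""),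
     PySem.List.slice pool none (some i) ++ PySem.List.slice pool (some (i + 1)) none))

-- f-strings "a-b-c" are ported as PySem.Str.join "-" [a, b, c] (exact: "-".join).
def generate_tripeptides_with_formulas_alt (amino_acids : List (String × String)) : List (String × String) :=
  let items : List (String × String) := (PySem.Dict.mk amino_acids).items
  (pvSelections items).flatMap (fun pr =>
    (pvSelections pr.2).flatMap (fun qr =>
      qr.2.map (fun r =>
        (PySem.Str.join "-" [pr.1.1, qr.1.1, r.1],
         PySem.Str.join "-" [pr.1.2, qr.1.2, r.2]))))

-- ===== PRECONDITION & SPEC =====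
-- Pre_ excludes association lists with duplicate keys: a Python dict has unique
-- keys, so such a list represents no input A was ever run on.
def Pre_generate_tripeptides_with_formulas (amino_acids : List (String × String)) : Prop :=
  (amino_acids.map Prod.fst).Nodup
instance (amino_acids : List (String × String)) : Decidable (Pre_generate_tripeptides_with_formulas amino_acids) := by unfold Pre_generate_tripeptides_with_formulas; infer_instance

def pvWitness_generate_tripeptides_with_formulas : (List (String × String)) :=
  [("Gly", "C2H3NO"), ("Ala", "C3H5NO"), ("Ser", "C3H5NO2")]

def Spec_generate_tripeptides_with_formulas (amino_acids : List (String × String)) (out : List (String × String)) : Prop := out = generate_tripeptides_with_formulas_alt amino_acids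
instance (amino_acids : List (String × String)) (out : List (String × String)) : Decidable (Spec_generate_tripeptides_with_formulas amino_acids out) := by unfold Spec_generate_tripeptides_with_formulas; infer_instance

-- ===== CLAIM (what is proved, stated in full; the proofs are below) =====
def Claim_equal_generate_tripeptides_with_formulas : Prop := ∀ (amino_acids : List (String × String)), Dom_generate_tripeptides_with_formulas amino_acids → Pre_generate_tripeptides_with_formulas amino_acids → Spec_generate_tripeptides_with_formulas amino_acids (generate_tripeptides_with_formulas amino_acids)

-- ===== LEMMAS AND PROOFS =====

-- the pair both programs build from an ordered triple of (key, value) entries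
def pvTrip (p q r : String × String) : String × String :=
  (PySem.Str.join "-" [p.1, q.1, r.1], PySem.Str.join "-" [p.2, q.2, r.2])

-- common normal form of both programs: nested flatMaps over filtered entry lists
def pvNF (l : List (String × String)) : List (String × String) :=
  l.flatMap (fun p =>
    (l.filter (fun q => q.1 ≠ p.1)).flatMap (fun q =>
      ((l.filter (fun r => r.1 ≠ p.1)).filter (fun r => r.1 ≠ q.1)).map (fun r => pvTrip p q r)))

lemma pvFilter_ne_getElem (l : List (String × String)) (h : (l.map Prod.fst).Nodup)
    (i : Nat) (hi : i < l.length) :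
    l.filter (fun q => q.1 ≠ l[i].1) = l.take i ++ l.drop (i + 1) := by
  induction l generalizing i with
  | nil => simp at hi
  | cons x xs ih =>
    simp only [List.map_cons, List.nodup_cons] at h
    obtain ⟨hx, hnd⟩ := h
    cases i with
    | zero =>
      simp only [List.getElem_cons_zero, List.take_zero, List.drop_succ_cons,
        List.drop_zero, List.nil_append]
      rw [List.filter_cons_of_neg (by simp)]
      exact List.filter_eq_self.2 (fun q hq => by
        simp only [decide_eq_true_eq]
        exact fun e => hx (e ▸ List.mem_map_of_mem hq))
    | succ j =>
      have hj : j < xs.length := by simpa using hi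
      have hne : x.1 ≠ xs[j].1 := fun e => hx (e ▸ List.mem_map_of_mem (List.getElem_mem hj))
      simp only [List.getElem_cons_succ, List.take_succ_cons, List.drop_succ_cons,
        List.cons_append]
      rw [List.filter_cons_of_pos (by simp [hne])]
      exact congrArg _ (ih hnd j hj)

lemma pvSelections_eq (l : List (String × String)) (h : (l.map Prod.fst).Nodup) :
    pvSelections l = l.map (fun p => (p, l.filter (fun q => q.1 ≠ p.1))) := by
  unfold pvSelections
  rw [PySem.List.pyRange_zero_nat]
  refine List.ext_getElem (by simp) (fun i h1 h2 => ?_)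
  have hi : i < l.length := by simpa using h2
  simp only [List.getElem_map, List.getElem_range, PySem.List.pyGetD_natCast,
    PySem.List.slice_to_natCast]
  rw [show ((i : Int) + 1) = ((i + 1 : Nat) : Int) by push_cast; ring,
    PySem.List.slice_from_natCast, pvFilter_ne_getElem l h i hi,
    List.getD_eq_getElem l ("", "") hi]

lemma pvNodup_filter (l : List (String × String)) (h : (l.map Prod.fst).Nodup)
    (p : (String × String) → Bool) : ((l.filter p).map Prod.fst).Nodup :=
  List.Nodup.sublist (List.Sublist.map Prod.fst (List.filter_sublist (l := l))) h

lemma B_eq_NF (l : List (String × String)) (h : (l.map Prod.fst).Nodup) :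
    generate_tripeptides_with_formulas_alt l = pvNF l := by
  show (pvSelections l).flatMap _ = pvNF l
  rw [pvSelections_eq l h, List.flatMap_map]
  refine List.flatMap_congr (fun p _ => ?_)
  rw [pvSelections_eq _ (pvNodup_filter l h _), List.flatMap_map]
  refine List.flatMap_congr (fun q _ => ?_)
  simp [pvTrip]

-- a scan over the whole list whose body is empty off a filter is a scan over the filter
lemma pvFlatMap_eq_flatMap_filter {α β : Type} (l : List α) (p : α → Bool) (g : α → List β)
    (hg : ∀ x ∈ l, p x = false → g x = []) : l.flatMap g = (l.filter p).flatMap g := by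
  induction l with
  | nil => rfl
  | cons x xs ih =>
    by_cases hx : p x = true
    · simp only [List.flatMap_cons, List.filter_cons_of_pos hx, List.flatMap_cons]
      rw [ih (fun y hy => hg y (List.mem_cons_of_mem x hy))]
    · simp only [List.flatMap_cons, List.filter_cons_of_neg hx,
        hg x (List.mem_cons_self) (by simpa using hx), List.nil_append]
      exact ih (fun y hy => hg y (List.mem_cons_of_mem x hy))

lemma A_eq_NF (l : List (String × String)) (h : (l.map Prod.fst).Nodup) :
    generate_tripeptides_with_formulas l = pvNF l := by
  have hk : (PySem.Dict.mk l).keys = l.map Prod.fst := by simp [PySem.Dict.keys]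
  have hget : ∀ p ∈ l, (PySem.Dict.mk l).getD p.1 "" = p.2 := fun p hp =>
    PySem.Dict.getD_of_mem_items _ (show (p.1, p.2) ∈ l from hp) (hk ▸ h) ""
  unfold generate_tripeptides_with_formulas
  simp only [PySem.List.foldl_append_ite, PySem.List.foldl_append_eq_flatMap, List.nil_append, hk]
  rw [List.flatMap_map]
  refine List.flatMap_congr (fun p hp => ?_)
  rw [List.flatMap_map]
  simp only [List.filter_map, List.map_map]
  rw [pvFlatMap_eq_flatMap_filter l (fun q => decide (q.1 ≠ p.1)) _
    (fun q _ hq => by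
      have hpq : q.1 = p.1 := by simpa using hq
      simp [hpq])]
  refine List.flatMap_congr (fun q hq => ?_)
  have hq1 : q.1 ≠ p.1 := by simpa using (List.mem_filter.1 hq).2
  have hql : q ∈ l := (List.mem_filter.1 hq).1
  rw [List.filter_filter]
  have hfil : List.filter ((fun x => decide (p.1 ≠ q.1 ∧ q.1 ≠ x ∧ x ≠ p.1)) ∘ Prod.fst) l
      = List.filter (fun r => decide (r.1 ≠ q.1) && decide (r.1 ≠ p.1)) l :=
    List.filter_congr (fun r _ => by simp [Function.comp, Ne.symm hq1, ne_comm])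
  rw [hfil]
  refine List.map_congr_left (fun r hr => ?_)
  have hrl : r ∈ l := List.mem_of_mem_filter hr
  simp only [Function.comp_def, hget p hp, hget q hql, hget r hrl, pvTrip]

-- ===== VERDICT (by name: the statement is the Claim_ definition above) =====
theorem generate_tripeptides_with_formulas_spec : Claim_equal_generate_tripeptides_with_formulas := by
  intro l _ hpre
  unfold Spec_generate_tripeptides_with_formulas
  rw [A_eq_NF l hpre, B_eq_NF l hpre]
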